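-- pv_equiv track=rewrite | github.com/shami-ah/OpenEvent-AI | backend/workflows/nlu/preferences.py | _match_against_features
-- ===== SOURCE A (Python) =====
-- import difflib
-- from typing import Any, Dict, Iterable, List, Optional, Sequence, Set, Tuple
--
-- def _match_against_features(wish_normalized: str, features: Set[str]) -> bool:
--     """Check if a wish matches any room feature using fuzzy matching."""
--     if not wish_normalized or not features:
--         return False
--     # Direct containment check
--     for feature in features:
--         if wish_normalized in feature or feature in wish_normalized:
--             return True
--         # Handle common variations: "sound system" vs "sound_system"
--         wish_no_space = wish_normalized.replace(" ", "")
--         feature_no_space = feature.replace(" ", "")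
--         if wish_no_space in feature_no_space or feature_no_space in wish_no_space:
--             return True
--     # Fuzzy match for close variations
--     for feature in features:
--         ratio = difflib.SequenceMatcher(a=wish_normalized, b=feature).ratio()
--         if ratio >= 0.8:
--             return True
--     return False
-- ===== SOURCE B (Python) =====
-- def _longest_common_block(a, b):
--     """Leftmost longest common substring of a and b as (start_a, start_b, size),
--     found with the classic dynamic-programming table of common-suffix lengths."""
--     best_i = best_j = best_size = 0
--     prev = [0] * (len(b) + 1)
--     for i in range(len(a)):
--         cur = [0] * (len(b) + 1)
--         for j in range(len(b)):
--             if a[i] == b[j]: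
--                 k = prev[j] + 1
--                 cur[j + 1] = k
--                 if k > best_size:
--                     best_i, best_j, best_size = i - k + 1, j - k + 1, k
--         prev = cur
--     return best_i, best_j, best_size
--
--
-- def _gestalt_matches(a, b):
--     """Characters matched by Ratcliff/Obershelp gestalt matching: take the longest
--     common block and recurse on the pieces to its left and to its right."""
--     i, j, k = _longest_common_block(a, b)
--     if k == 0:
--         return 0
--     return k + _gestalt_matches(a[:i], b[:j]) + _gestalt_matches(a[i + k:], b[j + k:])
--
--
-- def _match_against_features(wish_normalized: str, features) -> bool:
--     """True iff the wish fuzzy-matches some feature: after stripping spaces one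
--     string contains the other (this subsumes plain containment), or the gestalt
--     similarity 2*matches/(len_sum) reaches 0.8 (decided in integers)."""
--     if not wish_normalized or not features:
--         return False
--     wish_no_space = wish_normalized.replace(" ", "")
--     for feature in features:
--         feature_no_space = feature.replace(" ", "")
--         if (wish_no_space in feature_no_space
--                 or feature_no_space in wish_no_space
--                 or 5 * _gestalt_matches(wish_normalized, feature)
--                     >= 2 * (len(wish_normalized) + len(feature))):
--             return True
--     return False
-- ===== Notes on version B (the rewrite author's own statement) =====
-- stated objective: alternative
-- what changed: B replaces the difflib.SequenceMatcher call by a self-contained Ratcliff/Obershelp gestalt similarity (classic DP table for the leftmost longest common block plus recursion on both sides, decided in exact integer arithmetic), drops the plain containment test (proved subsumed by the space-stripped containment test) and fuses A's two staged scans over the features into one loop; Pre_ excludes inputs with a 200+-character feature, where SequenceMatcher's autojunk popularity heuristic (an implementation artefact) skews the similarity score while B computes the plain gestalt similarity.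
import Mathlib
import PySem

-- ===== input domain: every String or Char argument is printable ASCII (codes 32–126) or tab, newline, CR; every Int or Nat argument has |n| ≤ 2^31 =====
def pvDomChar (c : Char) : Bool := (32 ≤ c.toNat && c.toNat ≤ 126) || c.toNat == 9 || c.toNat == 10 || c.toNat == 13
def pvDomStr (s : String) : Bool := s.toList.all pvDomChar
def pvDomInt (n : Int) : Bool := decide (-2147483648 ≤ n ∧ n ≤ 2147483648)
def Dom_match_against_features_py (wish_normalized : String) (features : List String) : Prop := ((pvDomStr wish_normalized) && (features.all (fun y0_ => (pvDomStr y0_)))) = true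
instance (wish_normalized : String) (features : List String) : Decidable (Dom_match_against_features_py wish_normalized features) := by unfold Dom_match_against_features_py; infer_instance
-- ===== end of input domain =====

-- B replaces the difflib call by a self-contained Ratcliff/Obershelp gestalt similarity
-- (DP for the leftmost longest common block + recursion), drops A's plain containment
-- test (subsumed by the space-stripped one, proved below) and fuses A's two staged
-- scans into one loop; Pre_ excludes 200+-char features, where difflib's autojunk
-- heuristic fires.  Objective: alternative.

-- ===== PORT A =====
-- A calls difflib.SequenceMatcher(...).ratio(); PySem does not cover difflib, so it is
-- ported by hand below, step for step.

-- __chain_b: b2j maps each element of b to its (increasing) list of indices; with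
-- autojunk (len(b) >= 200) the "popular" elements (count > len(b)//100 + 1) are deleted.
def pvB2j (b : List Char) : PySem.Dict Char (List Nat) :=
  let d := b.zipIdx.foldl
    (fun d (cj : Char × Nat) => d.insert cj.1 ((d.getD cj.1 []) ++ [cj.2])) PySem.Dict.empty
  if 200 ≤ b.length then
    let ntest := b.length / 100 + 1
    d.items.foldl (fun d' kv => if ntest < kv.2.length then d'.erase kv.1 else d') d
  else d

-- find_longest_match, phase 1: the b2j/j2len scan over i in range(alo, ahi).
-- (in Python j2len.get(j-1, 0) with j = 0 looks up key -1, always absent: the j = 0 case.)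
def pvFlmScan (a : List Char) (b2j : PySem.Dict Char (List Nat)) (alo ahi blo bhi : Nat) :
    Nat × Nat × Nat :=
  let step := fun (st : (Nat × Nat × Nat) × PySem.Dict Nat Nat) (i : Nat) =>
    let js := (b2j.getD (a.getD i ' ') []).filter (fun j => blo ≤ j && j < bhi)
    js.foldl
      (fun (st2 : (Nat × Nat × Nat) × PySem.Dict Nat Nat) j =>
        let k := (if j = 0 then 0 else st.2.getD (j - 1) 0) + 1
        let best := if st2.1.2.2 < k then (i + 1 - k, j + 1 - k, k) else st2.1
        (best, st2.2.insert j k))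
      (st.1, PySem.Dict.empty)
  ((List.range' alo (ahi - alo)).foldl step ((alo, blo, 0), PySem.Dict.empty)).1

-- find_longest_match, phase 2: the two extension while-loops (bjunk is empty since
-- isjunk is None, so the junk-extension loops never run and are omitted).
-- fuel = besti (left) / ahi (right) bounds the number of iterations.
def pvExtL (a b : List Char) (alo blo : Nat) :
    Nat → Nat → Nat → Nat → Nat × Nat × Nat
  | 0, besti, bestj, bestsize => (besti, bestj, bestsize)
  | fuel + 1, besti, bestj, bestsize =>
    if alo < besti && blo < bestj && (a.getD (besti - 1) ' ' == b.getD (bestj - 1) ' ') then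
      pvExtL a b alo blo fuel (besti - 1) (bestj - 1) (bestsize + 1)
    else (besti, bestj, bestsize)

def pvExtR (a b : List Char) (ahi bhi : Nat) :
    Nat → Nat → Nat → Nat → Nat
  | 0, _, _, bestsize => bestsize
  | fuel + 1, besti, bestj, bestsize =>
    if besti + bestsize < ahi && bestj + bestsize < bhi
        && (a.getD (besti + bestsize) ' ' == b.getD (bestj + bestsize) ' ') then
      pvExtR a b ahi bhi fuel besti bestj (bestsize + 1)
    else bestsize

def pvFlm (a b : List Char) (b2j : PySem.Dict Char (List Nat)) (alo ahi blo bhi : Nat) :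
    Nat × Nat × Nat :=
  let (i, j, k) := pvFlmScan a b2j alo ahi blo bhi
  let (i, j, k) := pvExtL a b alo blo i i j k
  (i, j, pvExtR a b ahi bhi ahi i j k)

-- get_matching_blocks: the used interval stack, summing only block sizes (ratio() needs
-- nothing else).  fuel = 2*a.length + 2 bounds the pops: at most a.length pops find a
-- block (blocks are disjoint in a) and each adds two intervals.
def pvMatches (a b : List Char) (b2j : PySem.Dict Char (List Nat)) :
    Nat → List (Nat × Nat × Nat × Nat) → Nat → Nat
  | 0, _, acc => acc
  | _ + 1, [], acc => acc
  | fuel + 1, (alo, ahi, blo, bhi) :: stack, acc =>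
    let (i, j, k) := pvFlm a b b2j alo ahi blo bhi
    if k = 0 then pvMatches a b b2j fuel stack acc
    else pvMatches a b b2j fuel ((alo, i, blo, j) :: (i + k, ahi, j + k, bhi) :: stack) (acc + k)

-- SequenceMatcher(a=w, b=f).ratio() >= 0.8, decided exactly: ratio = 2*M/(la+lb) and the
-- float comparison against 0.8 agrees with the rational test 5*M >= 2*(la+lb) on this domain
-- (the rationals involved are never close enough to 0.8 for double rounding to flip the test).
def pvRatioGE08 (w f : String) : Bool :=
  let a := w.toList
  let b := f.toList
  let M := pvMatches a b (pvB2j b) (2 * a.length + 2) [(0, a.length, 0, b.length)] 0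
  decide (2 * (a.length + b.length) ≤ 5 * M)

-- first scan: direct containment and no-space containment
def pvContainLoop (wish_normalized : String) : List String → Bool
  | [] => false
  | feature :: rest =>
    if PySem.Str.isIn wish_normalized feature || PySem.Str.isIn feature wish_normalized then
      true
    else
      let wish_no_space := PySem.Str.replace wish_normalized " " ""
      let feature_no_space := PySem.Str.replace feature " " ""
      if PySem.Str.isIn wish_no_space feature_no_space
          || PySem.Str.isIn feature_no_space wish_no_space then true
      else pvContainLoop wish_normalized rest

-- second scan: fuzzy match
def pvFuzzyLoop (wish_normalized : String) : List String → Bool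
  | [] => false
  | feature :: rest =>
    if pvRatioGE08 wish_normalized feature then true
    else pvFuzzyLoop wish_normalized rest

def match_against_features_py (wish_normalized : String) (features : List String) : Bool :=
  if wish_normalized.toList.isEmpty || features.isEmpty then false
  else if pvContainLoop wish_normalized features then true
  else pvFuzzyLoop wish_normalized features

-- ===== PORT B =====
-- _longest_common_block: DP over rows; prev[j] is the common-suffix length ending at
-- (i-1, j-1), cur is built by appending (Python appends k for each j).
def pvLcb (a b : List Char) : Nat × Nat × Nat :=
  ((List.range a.length).foldl
    (fun (st : (Nat × Nat × Nat) × List Nat) i =>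
      (List.range b.length).foldl
        (fun (st2 : (Nat × Nat × Nat) × List Nat) j =>
          let k := if a.getD i ' ' == b.getD j ' ' then st.2.getD j 0 + 1 else 0
          let best := if st2.1.2.2 < k then (i + 1 - k, j + 1 - k, k) else st2.1
          (best, st2.2 ++ [k]))
        (st.1, [0]))
    ((0, 0, 0), List.replicate (b.length + 1) 0)).1

-- _gestalt_matches: Source B's recursion, with a fuel argument making it structural
-- (fuel = len(a)+1 suffices: each recursive call strictly shrinks a; a[:i] is take i,
-- a[i+k:] is drop (i+k), exact for the in-range bounds _longest_common_block returns).
def pvGestalt : List Char → List Char → Nat → Nat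
  | _, _, 0 => 0
  | a, b, fuel + 1 =>
    let (i, j, k) := pvLcb a b
    if k = 0 then 0
    else k + pvGestalt (a.take i) (b.take j) fuel + pvGestalt (a.drop (i + k)) (b.drop (j + k)) fuel

-- Source B's single for-loop: per feature, space-stripped containment or gestalt ratio >= 0.8
-- (5 * matches >= 2 * (len(a)+len(b)), Source B's integer form)
def pvAltLoop (wish_normalized wish_no_space : String) : List String → Bool
  | [] => false
  | feature :: rest =>
    let feature_no_space := PySem.Str.replace feature " " ""
    if PySem.Str.isIn wish_no_space feature_no_space
        || PySem.Str.isIn feature_no_space wish_no_space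
        || decide (2 * (wish_normalized.toList.length + feature.toList.length)
            ≤ 5 * pvGestalt wish_normalized.toList feature.toList
                (wish_normalized.toList.length + 1)) then true
    else pvAltLoop wish_normalized wish_no_space rest

def match_against_features_py_alt (wish_normalized : String) (features : List String) : Bool :=
  if wish_normalized.toList.isEmpty || features.isEmpty then false
  else pvAltLoop wish_normalized (PySem.Str.replace wish_normalized " " "") features

-- ===== PRECONDITION & SPEC =====
-- Pre_ excludes inputs with a feature of 200+ characters: there difflib's autojunk
-- popularity heuristic (an artefact of SequenceMatcher's implementation) skews the
-- similarity score, and B computes the plain gestalt similarity instead.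
def Pre_match_against_features_py (wish_normalized : String) (features : List String) : Prop :=
  ∀ f ∈ features, f.toList.length < 200
instance (wish_normalized : String) (features : List String) : Decidable (Pre_match_against_features_py wish_normalized features) := by unfold Pre_match_against_features_py; infer_instance

def pvWitness_match_against_features_py : String × List String :=
  ("sound system", ["big hall", "soundsystem"])

def Spec_match_against_features_py (wish_normalized : String) (features : List String) (out : Bool) : Prop := out = match_against_features_py_alt wish_normalized features
instance (wish_normalized : String) (features : List String) (out : Bool) : Decidable (Spec_match_against_features_py wish_normalized features out) := by unfold Spec_match_against_features_py; infer_instance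

-- ===== CLAIM =====
def Claim_equal_match_against_features_py : Prop := ∀ (wish_normalized : String) (features : List String), Dom_match_against_features_py wish_normalized features → Pre_match_against_features_py wish_normalized features → Spec_match_against_features_py wish_normalized features (match_against_features_py wish_normalized features)

-- ===== LEMMAS AND PROOFS =====

-- ---------- replacing " " by "" is filtering the spaces out ----------
theorem pv_replace_go_filter (fuel : Nat) (l acc : List Char) (h : l.length ≤ fuel) :
    PySem.Chars.replace.go [' '] [] fuel l acc
      = acc.reverse ++ l.filter (fun c => !(c == ' ')) := by
  induction fuel generalizing l acc with
  | zero =>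
    have : l = [] := List.eq_nil_of_length_eq_zero (Nat.le_zero.mp h)
    subst this; simp [PySem.Chars.replace.go]
  | succ fuel ih =>
    cases l with
    | nil => simp [PySem.Chars.replace.go]
    | cons c t =>
      simp only [PySem.Chars.replace.go]
      simp only [List.length_cons] at h
      by_cases hc : c = ' '
      · subst hc
        rw [if_pos (by simp [List.isPrefixOf])]
        show PySem.Chars.replace.go [' '] [] fuel t acc = _
        rw [ih t acc (by omega)]
        simp
      · rw [if_neg (by simp [List.isPrefixOf, Ne.symm hc])]
        rw [ih t (c :: acc) (by omega)]
        simp [hc]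

theorem pv_replace_eq_filter (s : String) :
    (PySem.Str.replace s " " "").toList = s.toList.filter (fun c => !(c == ' ')) := by
  rw [PySem.Str.toList_replace]
  show PySem.Chars.replace s.toList [' '] [] = _
  unfold PySem.Chars.replace
  rw [if_neg (by simp)]
  exact pv_replace_go_filter _ _ _ le_rfl

-- containment survives deleting the spaces from both strings
theorem pv_isIn_nospace (a b : String) (h : PySem.Str.isIn a b = true) :
    PySem.Str.isIn (PySem.Str.replace a " " "") (PySem.Str.replace b " " "") = true := by
  rw [PySem.Str.isIn_iff_infix] at h ⊢
  rw [pv_replace_eq_filter, pv_replace_eq_filter]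
  exact List.IsInfix.filter _ h

-- ---------- run lengths (common-suffix lengths) ----------
def pvRun (a b : List Char) : Nat → Nat → Nat
  | 0, j => if a.getD 0 ' ' == b.getD j ' ' then 1 else 0
  | i+1, 0 => if a.getD (i+1) ' ' == b.getD 0 ' ' then 1 else 0
  | i+1, j+1 => if a.getD (i+1) ' ' == b.getD (j+1) ' ' then pvRun a b i j + 1 else 0

theorem pvRun_le (a b : List Char) : ∀ i j, pvRun a b i j ≤ min (i+1) (j+1) := by
  intro i
  induction i with
  | zero => intro j; simp only [pvRun]; split <;> omega
  | succ i ih =>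
    intro j
    cases j with
    | zero => simp only [pvRun]; split <;> omega
    | succ j => simp only [pvRun]; split
                · have := ih j; omega
                · omega

theorem pvRun_eq_zero (a b : List Char) (i j : Nat)
    (h : (a.getD i ' ' == b.getD j ' ') = false) : pvRun a b i j = 0 := by
  cases i <;> cases j <;> (simp only [pvRun]; rw [if_neg (by simpa using h)])

theorem pvRun_succ (a b : List Char) (i j : Nat)
    (h : (a.getD (i+1) ' ' == b.getD (j+1) ' ') = true) :
    pvRun a b (i+1) (j+1) = pvRun a b i j + 1 := by
  simp only [pvRun]; rw [if_pos (by simpa using h)]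

theorem pvRun_one_le (a b : List Char) (i j : Nat)
    (h : (a.getD i ' ' == b.getD j ' ') = true) : 1 ≤ pvRun a b i j := by
  cases i <;> cases j <;> (simp only [pvRun]; rw [if_pos (by simpa using h)]) <;> omega

theorem pvRun_stop (a b : List Char) : ∀ i j, pvRun a b i j ≤ i → pvRun a b i j ≤ j →
    (a.getD (i - pvRun a b i j) ' ' == b.getD (j - pvRun a b i j) ' ') = false := by
  intro i
  induction i with
  | zero =>
    intro j h1 h2
    cases hm : (a.getD 0 ' ' == b.getD j ' ')
    · have h0 := pvRun_eq_zero a b 0 j hm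
      rw [h0]; simpa using hm
    · have := pvRun_one_le a b 0 j hm; omega
  | succ i ih =>
    intro j h1 h2
    cases j with
    | zero =>
      cases hm : (a.getD (i+1) ' ' == b.getD 0 ' ')
      · have h0 := pvRun_eq_zero a b (i+1) 0 hm
        rw [h0]; simpa using hm
      · have := pvRun_one_le a b (i+1) 0 hm; omega
    | succ j =>
      cases hm : (a.getD (i+1) ' ' == b.getD (j+1) ' ')
      · have h0 := pvRun_eq_zero a b (i+1) (j+1) hm
        rw [h0]; simpa using hm
      · have hs := pvRun_succ a b i j hm
        rw [hs] at h1 h2 ⊢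
        have e1 : i + 1 - (pvRun a b i j + 1) = i - pvRun a b i j := by omega
        have e2 : j + 1 - (pvRun a b i j + 1) = j - pvRun a b i j := by omega
        rw [e1, e2]
        exact ih j (by omega) (by omega)

-- ---------- canonical best fold ----------
def pvUpd (a b : List Char) (i : Nat) (s : Nat × Nat × Nat) (j : Nat) : Nat × Nat × Nat :=
  if s.2.2 < pvRun a b i j then (i + 1 - pvRun a b i j, j + 1 - pvRun a b i j, pvRun a b i j) else s

def pvRowJs (a b : List Char) (i : Nat) : List Nat :=
  (List.range b.length).filter (fun j => a.getD i ' ' == b.getD j ' ')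

def pvBestRows (a b : List Char) (m : Nat) : Nat × Nat × Nat :=
  (List.range m).foldl (fun s i => (pvRowJs a b i).foldl (pvUpd a b i) s) (0, 0, 0)

def pvBestAll (a b : List Char) : Nat × Nat × Nat := pvBestRows a b a.length

def pvOffs (alo blo : Nat) (t : Nat × Nat × Nat) : Nat × Nat × Nat :=
  (alo + t.1, blo + t.2.1, t.2.2)

-- ---------- slices ----------
theorem pv_slice_getD (l : List Char) (lo n t : Nat) (h : t < n) (d : Char) :
    ((l.drop lo).take n).getD t d = l.getD (lo + t) d := by
  rw [List.getD_eq_getElem?_getD, List.getD_eq_getElem?_getD, List.getElem?_take,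
    if_pos h, List.getElem?_drop]

theorem pv_slice_len (l : List Char) (lo n : Nat) (h : lo + n ≤ l.length) :
    ((l.drop lo).take n).length = n := by
  simp only [List.length_take, List.length_drop]; omega

-- ---------- generic fold lemmas ----------
theorem pv_foldl_pair_append {S : Type} (g : (S × List Nat) → Nat → (S × List Nat))
    (upd : S → Nat → S) (kv : Nat → Nat)
    (hg : ∀ st2 j, g st2 j = (upd st2.1 j, st2.2 ++ [kv j])) :
    ∀ (js : List Nat) (s : S) (acc : List Nat),
      js.foldl g (s, acc) = (js.foldl upd s, acc ++ js.map kv) := by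
  intro js
  induction js with
  | nil => intro s acc; simp
  | cons j js ih =>
    intro s acc
    simp only [List.foldl_cons, List.map_cons, hg]
    rw [ih]
    simp

theorem pv_foldl_pair_insert {S : Type} (g : (S × PySem.Dict Nat Nat) → Nat → (S × PySem.Dict Nat Nat))
    (upd : S → Nat → S) (kv : Nat → Nat)
    (hg : ∀ st2 j, g st2 j = (upd st2.1 j, st2.2.insert j (kv j))) :
    ∀ (js : List Nat) (s : S) (d : PySem.Dict Nat Nat),
      js.foldl g (s, d) = (js.foldl upd s, js.foldl (fun d j => d.insert j (kv j)) d) := by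
  intro js
  induction js with
  | nil => intro s d; simp
  | cons j js ih =>
    intro s d
    simp only [List.foldl_cons, hg]
    rw [ih]

theorem pv_getD_foldl_insert (g : PySem.Dict Nat Nat → Nat → PySem.Dict Nat Nat)
    (kv : Nat → Nat) (hg : ∀ d j, g d j = d.insert j (kv j)) :
    ∀ (js : List Nat) (d : PySem.Dict Nat Nat) (q : Nat),
      (js.foldl g d).getD q 0 = if q ∈ js then kv q else d.getD q 0 := by
  intro js
  induction js with
  | nil => intro d q; simp
  | cons j js ih =>
    intro d q
    simp only [List.foldl_cons, hg]
    rw [ih]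
    by_cases hq : q ∈ js
    · simp [hq]
    · by_cases hj : q = j
      · simp [hq, hj, PySem.Dict.getD_insert]
      · simp [hq, hj, PySem.Dict.getD_insert]

theorem pv_foldl_skip {S : Type} (p : Nat → Bool) (upd : S → Nat → S)
    (h : ∀ s j, p j = false → upd s j = s) :
    ∀ (js : List Nat) (s : S), js.foldl upd s = (js.filter p).foldl upd s := by
  intro js
  induction js with
  | nil => intro s; rfl
  | cons j js ih =>
    intro s
    simp only [List.foldl_cons, List.filter_cons]
    cases hp : p j
    · rw [h s j hp]; exact ih s
    · simp only [List.foldl_cons]; exact ih (upd s j)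

theorem pv_foldl_congr {S : Type} (f g : S → Nat → S) :
    ∀ (js : List Nat), (∀ j ∈ js, ∀ s, f s j = g s j) →
      ∀ (s : S), js.foldl f s = js.foldl g s := by
  intro js
  induction js with
  | nil => intro _ s; rfl
  | cons j js ih =>
    intro h s
    simp only [List.foldl_cons]
    rw [h j (by simp)]
    exact ih (fun j hj s => h j (by simp [hj]) s) _

-- ---------- b2j characterization (no autojunk) ----------
theorem pvB2j_getD (b : List Char) (h : b.length < 200) (c : Char) :
    (pvB2j b).getD c [] = (List.range b.length).filter (fun j => b.getD j ' ' == c) := by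
  have aux : ∀ (xs : List Char) (m : Nat) (d : PySem.Dict Char (List Nat)),
      b.drop m = xs →
      (∀ c', d.getD c' [] = (List.range m).filter (fun j => b.getD j ' ' == c')) →
      ∀ c', ((xs.zipIdx m).foldl
          (fun d (cj : Char × Nat) => d.insert cj.1 ((d.getD cj.1 []) ++ [cj.2])) d).getD c' []
        = (List.range (m + xs.length)).filter (fun j => b.getD j ' ' == c') := by
    intro xs
    induction xs with
    | nil => intro m d _ hd c'; simpa using hd c'
    | cons x t ih =>
      intro m d hxs hd c'
      have hx : b[m]?.getD ' ' = x := by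
        have h0 : (b.drop m)[0]? = some x := by rw [hxs]; rfl
        rw [List.getElem?_drop, Nat.add_zero] at h0
        simp [h0]
      have ht : b.drop (m+1) = t := by
        have htl : (b.drop m).tail = t := by rw [hxs]; rfl
        rw [← htl, List.tail_drop]
      have hd' : ∀ c', (d.insert x (d.getD x [] ++ [m])).getD c' []
          = (List.range (m+1)).filter (fun j => b.getD j ' ' == c') := by
        intro c'
        rw [PySem.Dict.getD_insert, List.range_succ, List.filter_append]
        by_cases hc : c' = x
        · subst hc; rw [if_pos rfl, hd]
          simp [hx]
        · rw [if_neg hc, hd]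
          simp [hx, Ne.symm hc]
      rw [List.zipIdx_cons, List.foldl_cons]
      have := ih (m+1) _ ht hd' c'
      have harith : m + 1 + t.length = m + (t.length + 1) := by omega
      rw [harith] at this
      simpa using this
  simp only [pvB2j]
  rw [if_neg (by omega)]
  have := aux b 0 PySem.Dict.empty (by simp)
    (by intro c'; simp [PySem.Dict.getD_empty]) c
  simpa using this

-- ---------- window arithmetic on index lists ----------
theorem pv_range_window (N blo bhi : Nat) (h1 : blo ≤ bhi) (h2 : bhi ≤ N) (q : Nat → Bool) :
    (List.range N).filter (fun j => (decide (blo ≤ j) && decide (j < bhi)) && q j)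
      = ((List.range (bhi - blo)).map (fun j' => blo + j')).filter q := by
  have e1 : List.range' 0 blo ++ List.range' blo (bhi - blo) = List.range' 0 bhi := by
    have h := @List.range'_append 0 blo (bhi - blo) 1
    simpa [Nat.one_mul, Nat.add_sub_cancel' h1] using h
  have e2 : List.range' 0 bhi ++ List.range' bhi (N - bhi) = List.range' 0 N := by
    have h := @List.range'_append 0 bhi (N - bhi) 1
    simpa [Nat.one_mul, Nat.add_sub_cancel' h2] using h
  rw [List.range_eq_range', ← e2, ← e1, List.filter_append, List.filter_append]
  have f1 : (List.range' 0 blo).filter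
      (fun j => (decide (blo ≤ j) && decide (j < bhi)) && q j) = [] := by
    apply List.filter_eq_nil_iff.mpr
    intro x hx
    have := List.mem_range'_1.mp hx
    simp only [Bool.and_eq_true, decide_eq_true_eq]
    omega
  have f3 : (List.range' bhi (N - bhi)).filter
      (fun j => (decide (blo ≤ j) && decide (j < bhi)) && q j) = [] := by
    apply List.filter_eq_nil_iff.mpr
    intro x hx
    have := List.mem_range'_1.mp hx
    simp only [Bool.and_eq_true, decide_eq_true_eq]
    omega
  have f2 : (List.range' blo (bhi - blo)).filter
      (fun j => (decide (blo ≤ j) && decide (j < bhi)) && q j)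
      = (List.range' blo (bhi - blo)).filter q := by
    apply List.filter_congr
    intro x hx
    have := List.mem_range'_1.mp hx
    have hb1 : decide (blo ≤ x) = true := by simp; omega
    have hb2 : decide (x < bhi) = true := by simp; omega
    rw [hb1, hb2]
    simp
  rw [f1, f3, f2]
  have : (List.range (bhi - blo)).map (fun j' => blo + j') = List.range' blo (bhi - blo) := by
    rw [List.range'_eq_map_range]
  rw [this]
  simp

-- ---------- best-fold facts ----------
theorem pv_bestfold_mono (a b : List Char) (i : Nat) :
    ∀ (js : List Nat) (s : Nat × Nat × Nat), s.2.2 ≤ (js.foldl (pvUpd a b i) s).2.2 := by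
  intro js
  induction js with
  | nil => intro s; exact le_refl _
  | cons j js ih =>
    intro s
    refine le_trans ?_ (ih (pvUpd a b i s j))
    unfold pvUpd
    split
    · next hlt => show s.2.2 ≤ pvRun a b i j; omega
    · exact le_refl _

theorem pv_bestfold_elem (a b : List Char) (i : Nat) :
    ∀ (js : List Nat) (s : Nat × Nat × Nat) (j : Nat), j ∈ js →
      pvRun a b i j ≤ (js.foldl (pvUpd a b i) s).2.2 := by
  intro js
  induction js with
  | nil => intro s j hj; simp at hj
  | cons j' js ih =>
    intro s j hj
    rcases List.mem_cons.mp hj with h | h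
    · subst h
      refine le_trans ?_ (pv_bestfold_mono a b i js (pvUpd a b i s j))
      unfold pvUpd
      split
      · exact le_refl _
      · next hge => show pvRun a b i j ≤ s.2.2; omega
    · exact ih (pvUpd a b i s j') j h

-- validity invariant of the best triple
def pvBOK (a b : List Char) (s : Nat × Nat × Nat) : Prop :=
  (s.2.2 = 0 → s = (0, 0, 0)) ∧
  (0 < s.2.2 → s.1 + s.2.2 ≤ a.length ∧ s.2.1 + s.2.2 ≤ b.length ∧
    pvRun a b (s.1 + s.2.2 - 1) (s.2.1 + s.2.2 - 1) = s.2.2)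

theorem pv_bestfold_ok (a b : List Char) (i : Nat) (hi : i < a.length) :
    ∀ (js : List Nat) (s : Nat × Nat × Nat), (∀ j ∈ js, j < b.length) → pvBOK a b s →
      pvBOK a b (js.foldl (pvUpd a b i) s) := by
  intro js
  induction js with
  | nil => intro s _ hs; exact hs
  | cons j js ih =>
    intro s hjs hs
    refine ih (pvUpd a b i s j) (fun j' hj' => hjs j' (by simp [hj'])) ?_
    have hjb : j < b.length := hjs j (by simp)
    unfold pvUpd
    split
    · next hlt =>
      have hk := pvRun_le a b i j
      have hk1 : 1 ≤ pvRun a b i j := by omega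
      constructor
      · intro h0
        have h0' : pvRun a b i j = 0 := h0
        omega
      · intro _
        refine ⟨?_, ?_, ?_⟩
        · show i + 1 - pvRun a b i j + pvRun a b i j ≤ a.length
          omega
        · show j + 1 - pvRun a b i j + pvRun a b i j ≤ b.length
          omega
        · show pvRun a b (i + 1 - pvRun a b i j + pvRun a b i j - 1)
            (j + 1 - pvRun a b i j + pvRun a b i j - 1) = pvRun a b i j
          have e1 : i + 1 - pvRun a b i j + pvRun a b i j - 1 = i := by omega
          have e2 : j + 1 - pvRun a b i j + pvRun a b i j - 1 = j := by omega
          rw [e1, e2]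
    · exact hs

theorem pvBestAll_ok (a b : List Char) : pvBOK a b (pvBestAll a b) := by
  have aux : ∀ (is : List Nat) (s : Nat × Nat × Nat), (∀ i ∈ is, i < a.length) → pvBOK a b s →
      pvBOK a b (is.foldl (fun s i => (pvRowJs a b i).foldl (pvUpd a b i) s) s) := by
    intro is
    induction is with
    | nil => intro s _ hs; exact hs
    | cons i is ih =>
      intro s his hs
      refine ih _ (fun i' hi' => his i' (by simp [hi'])) ?_
      refine pv_bestfold_ok a b i (his i (by simp)) _ s ?_ hs
      intro j hj
      have := List.mem_filter.mp hj
      exact List.mem_range.mp this.1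
  refine aux (List.range a.length) (0,0,0) (fun i hi => List.mem_range.mp hi) ?_
  constructor
  · intro _; rfl
  · intro h; simp at h

theorem pvBestAll_max (a b : List Char) :
    ∀ i < a.length, ∀ j < b.length, pvRun a b i j ≤ (pvBestAll a b).2.2 := by
  have rows_mono : ∀ (is : List Nat) (s : Nat × Nat × Nat),
      s.2.2 ≤ (is.foldl (fun s i => (pvRowJs a b i).foldl (pvUpd a b i) s) s).2.2 := by
    intro is
    induction is with
    | nil => intro s; exact le_refl _
    | cons i is ih =>
      intro s
      exact le_trans (pv_bestfold_mono a b i (pvRowJs a b i) s) (ih _)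
  have aux : ∀ (is : List Nat) (s : Nat × Nat × Nat) (i : Nat), i ∈ is →
      ∀ j ∈ pvRowJs a b i,
      pvRun a b i j ≤ (is.foldl (fun s i => (pvRowJs a b i).foldl (pvUpd a b i) s) s).2.2 := by
    intro is
    induction is with
    | nil => intro s i hi; simp at hi
    | cons i' is ih =>
      intro s i hi j hj
      rcases List.mem_cons.mp hi with h | h
      · subst h
        exact le_trans (pv_bestfold_elem a b i (pvRowJs a b i) s j hj) (rows_mono is _)
      · exact ih _ i h j hj
  intro i hi j hj
  cases hm : (a.getD i ' ' == b.getD j ' ')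
  · rw [pvRun_eq_zero a b i j hm]; omega
  · refine aux (List.range a.length) (0,0,0) i (List.mem_range.mpr hi) j ?_
    exact List.mem_filter.mpr ⟨List.mem_range.mpr hj, hm⟩

-- ---------- B scan = canonical ----------
def pvPrevRow (a b : List Char) (m : Nat) : List Nat :=
  if m = 0 then List.replicate (b.length + 1) 0
  else 0 :: (List.range b.length).map (pvRun a b (m-1))

theorem pvPrevP (a b : List Char) (m : Nat) :
    ∀ j, (pvPrevRow a b m).getD j 0
      = if 1 ≤ j ∧ j ≤ b.length ∧ 1 ≤ m then pvRun a b (m-1) (j-1) else 0 := by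
  intro j
  unfold pvPrevRow
  by_cases hm : m = 0
  · rw [if_pos hm]
    rw [if_neg (by omega)]
    by_cases hj : j < b.length + 1
    · exact List.getD_replicate 0 hj
    · rw [List.getD_eq_getElem?_getD, List.getElem?_eq_none (by simp; omega)]
      rfl
  · rw [if_neg hm]
    cases j with
    | zero => rw [if_neg (by omega)]; rfl
    | succ j =>
      by_cases hj : j < b.length
      · rw [if_pos (by omega)]
        show ((List.range b.length).map (pvRun a b (m-1))).getD j 0 = pvRun a b (m-1) (j+1-1)
        rw [List.getD_eq_getElem?_getD]
        rw [List.getElem?_map, List.getElem?_range hj]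
        rfl
      · rw [if_neg (by omega)]
        show ((List.range b.length).map (pvRun a b (m-1))).getD j 0 = 0
        rw [List.getD_eq_getElem?_getD, List.getElem?_eq_none (by simp; omega)]
        rfl

theorem pv_lcb_row (a b : List Char) (i : Nat) (prev : List Nat)
    (hprev : ∀ j, prev.getD j 0
      = if 1 ≤ j ∧ j ≤ b.length ∧ 1 ≤ i then pvRun a b (i-1) (j-1) else 0)
    (s : Nat × Nat × Nat) :
    (List.range b.length).foldl (fun (st2 : (Nat × Nat × Nat) × List Nat) j =>
        let k := if a.getD i ' ' == b.getD j ' ' then prev.getD j 0 + 1 else 0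
        let best := if st2.1.2.2 < k then (i + 1 - k, j + 1 - k, k) else st2.1
        (best, st2.2 ++ [k])) (s, [0])
      = ((pvRowJs a b i).foldl (pvUpd a b i) s,
         0 :: (List.range b.length).map (pvRun a b i)) := by
  have kv_eq : ∀ j < b.length,
      (if a.getD i ' ' == b.getD j ' ' then prev.getD j 0 + 1 else 0) = pvRun a b i j := by
    intro j hj
    cases hm : (a.getD i ' ' == b.getD j ' ')
    · rw [if_neg (by simp), pvRun_eq_zero a b i j hm]
    · rw [if_pos rfl, hprev j]
      cases j with
      | zero =>
        rw [if_neg (by omega)]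
        cases i <;> (simp only [pvRun]; rw [if_pos hm])
      | succ j =>
        cases i with
        | zero =>
          rw [if_neg (by omega)]
          simp only [pvRun]; rw [if_pos hm]
        | succ i =>
          rw [if_pos (by omega)]
          rw [pvRun_succ a b i j hm]
          simp
  rw [pv_foldl_pair_append _
    (fun (t : Nat × Nat × Nat) j =>
      if t.2.2 < (if a.getD i ' ' == b.getD j ' ' then prev.getD j 0 + 1 else 0) then
        (i + 1 - (if a.getD i ' ' == b.getD j ' ' then prev.getD j 0 + 1 else 0),
         j + 1 - (if a.getD i ' ' == b.getD j ' ' then prev.getD j 0 + 1 else 0),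
         (if a.getD i ' ' == b.getD j ' ' then prev.getD j 0 + 1 else 0)) else t)
    (fun j => if a.getD i ' ' == b.getD j ' ' then prev.getD j 0 + 1 else 0)
    (fun st2 j => rfl)]
  rw [Prod.mk.injEq]
  constructor
  · rw [pv_foldl_congr _ (pvUpd a b i) (List.range b.length)
      (fun j hj t => by
        have hk := kv_eq j (List.mem_range.mp hj)
        unfold pvUpd
        rw [hk])]
    exact pv_foldl_skip (fun j => a.getD i ' ' == b.getD j ' ') (pvUpd a b i)
      (fun t j hp => by unfold pvUpd; rw [pvRun_eq_zero a b i j hp]; simp) _ s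
  · show [0] ++ (List.range b.length).map _ = 0 :: (List.range b.length).map (pvRun a b i)
    rw [List.map_congr_left (fun j hj => kv_eq j (List.mem_range.mp hj))]
    rfl

theorem pvLcb_aux (a b : List Char) : ∀ m,
    (List.range m).foldl
      (fun (st : (Nat × Nat × Nat) × List Nat) i =>
        (List.range b.length).foldl
          (fun (st2 : (Nat × Nat × Nat) × List Nat) j =>
            let k := if a.getD i ' ' == b.getD j ' ' then st.2.getD j 0 + 1 else 0
            let best := if st2.1.2.2 < k then (i + 1 - k, j + 1 - k, k) else st2.1
            (best, st2.2 ++ [k]))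
          (st.1, [0]))
      ((0, 0, 0), List.replicate (b.length + 1) 0)
    = (pvBestRows a b m, pvPrevRow a b m) := by
  intro m
  induction m with
  | zero => simp [pvBestRows, pvPrevRow]
  | succ m ih =>
    rw [List.range_succ, List.foldl_append, ih]
    simp only [List.foldl_cons, List.foldl_nil]
    have hrow := pv_lcb_row a b m (pvPrevRow a b m) (pvPrevP a b m) (pvBestRows a b m)
    rw [hrow]
    rw [Prod.mk.injEq]
    constructor
    · show (pvRowJs a b m).foldl (pvUpd a b m) (pvBestRows a b m) = pvBestRows a b (m+1)
      unfold pvBestRows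
      rw [List.range_succ, List.foldl_append]
      simp
    · show (0 : Nat) :: (List.range b.length).map (pvRun a b m) = pvPrevRow a b (m+1)
      unfold pvPrevRow
      rw [if_neg (by omega)]
      simp

theorem pvLcb_eq_bestAll (a b : List Char) : pvLcb a b = pvBestAll a b := by
  unfold pvLcb
  rw [pvLcb_aux a b a.length]
  rfl


-- ---------- A scan = offset canonical on the slice ----------
-- the best-update fold, shifted by the window offsets
theorem pv_offs_fold (a' b' : List Char) (alo blo m : Nat) (kA : Nat → Nat) :
    ∀ (js' : List Nat), (∀ j' ∈ js', kA (blo + j') = pvRun a' b' m j') →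
      ∀ (sB : Nat × Nat × Nat),
      js'.foldl (fun s j' =>
          if s.2.2 < kA (blo + j') then
            (alo + m + 1 - kA (blo + j'), blo + j' + 1 - kA (blo + j'), kA (blo + j'))
          else s) (pvOffs alo blo sB)
        = pvOffs alo blo (js'.foldl (pvUpd a' b' m) sB) := by
  intro js'
  induction js' with
  | nil => intro _ sB; rfl
  | cons j' js' ih =>
    intro hk sB
    simp only [List.foldl_cons]
    have hkj := hk j' (by simp)
    have hle := pvRun_le a' b' m j'
    have hstep : (if (pvOffs alo blo sB).2.2 < kA (blo + j') then
          (alo + m + 1 - kA (blo + j'), blo + j' + 1 - kA (blo + j'), kA (blo + j'))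
        else pvOffs alo blo sB) = pvOffs alo blo (pvUpd a' b' m sB j') := by
      unfold pvUpd pvOffs
      rw [hkj]
      by_cases hc : sB.2.2 < pvRun a' b' m j'
      · rw [if_pos hc, if_pos hc]
        have e1 : alo + m + 1 - pvRun a' b' m j' = alo + (m + 1 - pvRun a' b' m j') := by omega
        have e2 : blo + j' + 1 - pvRun a' b' m j' = blo + (j' + 1 - pvRun a' b' m j') := by omega
        rw [e1, e2]
      · rw [if_neg hc, if_neg hc]
    rw [hstep]
    exact ih (fun x hx => hk x (by simp [hx])) _

-- character access and match tests transfer to the slices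
theorem pv_match_transfer (a b : List Char) (alo ahi blo bhi m j' : Nat)
    (hm : m < ahi - alo) (hj : j' < bhi - blo) :
    (a.getD (alo + m) ' ' == b.getD (blo + j') ' ')
      = (((a.drop alo).take (ahi - alo)).getD m ' ' == ((b.drop blo).take (bhi - blo)).getD j' ' ') := by
  rw [pv_slice_getD a alo (ahi - alo) m hm, pv_slice_getD b blo (bhi - blo) j' hj]

-- the k computed from the previous-row dict is the run length
theorem pv_kA_eq (a b : List Char) (alo ahi blo bhi m : Nat)
    (hm : m < ahi - alo) (d : PySem.Dict Nat Nat)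
    (hd : ∀ q, d.getD q 0 = if blo ≤ q ∧ q < bhi ∧ 1 ≤ m then
        pvRun ((a.drop alo).take (ahi - alo)) ((b.drop blo).take (bhi - blo)) (m-1) (q - blo) else 0)
    (j' : Nat) (hj : j' < bhi - blo)
    (hmatch : (((a.drop alo).take (ahi - alo)).getD m ' '
        == ((b.drop blo).take (bhi - blo)).getD j' ' ') = true) :
    (if blo + j' = 0 then 0 else d.getD (blo + j' - 1) 0) + 1
      = pvRun ((a.drop alo).take (ahi - alo)) ((b.drop blo).take (bhi - blo)) m j' := by
  cases j' with
  | zero =>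
    have hz : (if blo + 0 = 0 then 0 else d.getD (blo + 0 - 1) 0) = 0 := by
      by_cases hb : blo = 0
      · rw [if_pos (by omega)]
      · rw [if_neg (by omega), hd]
        rw [if_neg (by omega)]
    rw [hz]
    cases m <;> (simp only [pvRun]; rw [if_pos hmatch])
  | succ j'' =>
    rw [if_neg (by omega)]
    have e : blo + (j'' + 1) - 1 = blo + j'' := by omega
    rw [e, hd]
    cases m with
    | zero =>
      rw [if_neg (by omega)]
      simp only [pvRun]; rw [if_pos hmatch]
    | succ mm =>
      rw [if_pos (by omega)]
      have e2 : blo + j'' - blo = j'' := by omega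
      have e3 : mm + 1 - 1 = mm := by omega
      rw [e2, e3, pvRun_succ _ _ mm j'' hmatch]

-- the filtered b2j index list is the shifted canonical row list
theorem pv_js_eq (a b : List Char) (alo ahi blo bhi m : Nat)
    (h1 : alo ≤ ahi) (h2 : ahi ≤ a.length) (h3 : blo ≤ bhi) (h4 : bhi ≤ b.length)
    (h200 : b.length < 200) (hm : m < ahi - alo) :
    ((pvB2j b).getD (a.getD (alo + m) ' ') []).filter (fun j => blo ≤ j && j < bhi)
      = (pvRowJs ((a.drop alo).take (ahi - alo)) ((b.drop blo).take (bhi - blo)) m).map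
          (fun j' => blo + j') := by
  rw [pvB2j_getD b h200]
  rw [List.filter_filter]
  have hw := pv_range_window b.length blo bhi h3 h4
    (fun j => b.getD j ' ' == a.getD (alo + m) ' ')
  rw [hw]
  rw [List.filter_map]
  congr 1
  unfold pvRowJs
  rw [pv_slice_len b blo (bhi - blo) (by omega)]
  apply List.filter_congr
  intro j' hj'
  have hjlt := List.mem_range.mp hj'
  show (b.getD (blo + j') ' ' == a.getD (alo + m) ' ')
    = (((a.drop alo).take (ahi - alo)).getD m ' ' == ((b.drop blo).take (bhi - blo)).getD j' ' ')
  rw [← pv_match_transfer a b alo ahi blo bhi m j' hm hjlt]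
  have hcomm : ∀ (x y : Char), (x == y) = (y == x) := fun x y => by
    by_cases h : x = y
    · simp [h]
    · simp [h, Ne.symm h]
  exact hcomm _ _

-- one row of A's scan equals one row of the canonical fold on the slices
theorem pv_flm_row (a b : List Char) (alo ahi blo bhi m : Nat)
    (h1 : alo ≤ ahi) (h2 : ahi ≤ a.length) (h3 : blo ≤ bhi) (h4 : bhi ≤ b.length)
    (h200 : b.length < 200) (hm : m < ahi - alo)
    (d : PySem.Dict Nat Nat)
    (hd : ∀ q, d.getD q 0 = if blo ≤ q ∧ q < bhi ∧ 1 ≤ m then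
        pvRun ((a.drop alo).take (ahi - alo)) ((b.drop blo).take (bhi - blo)) (m-1) (q - blo) else 0)
    (sB : Nat × Nat × Nat) :
    (((pvB2j b).getD (a.getD (alo + m) ' ') []).filter (fun j => blo ≤ j && j < bhi)).foldl
        (fun (st2 : (Nat × Nat × Nat) × PySem.Dict Nat Nat) j =>
          let k := (if j = 0 then 0 else d.getD (j - 1) 0) + 1
          let best := if st2.1.2.2 < k then (alo + m + 1 - k, j + 1 - k, k) else st2.1
          (best, st2.2.insert j k))
        (pvOffs alo blo sB, PySem.Dict.empty)
      |> (fun r =>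
          r.1 = pvOffs alo blo
              ((pvRowJs ((a.drop alo).take (ahi - alo)) ((b.drop blo).take (bhi - blo)) m).foldl
                (pvUpd ((a.drop alo).take (ahi - alo)) ((b.drop blo).take (bhi - blo)) m) sB)
          ∧ ∀ q, r.2.getD q 0 = if blo ≤ q ∧ q < bhi then
              pvRun ((a.drop alo).take (ahi - alo)) ((b.drop blo).take (bhi - blo)) m (q - blo) else 0) := by
  rw [pv_foldl_pair_insert _
    (fun (t : Nat × Nat × Nat) j =>
      if t.2.2 < (if j = 0 then 0 else d.getD (j - 1) 0) + 1 then
        (alo + m + 1 - ((if j = 0 then 0 else d.getD (j - 1) 0) + 1),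
         j + 1 - ((if j = 0 then 0 else d.getD (j - 1) 0) + 1),
         (if j = 0 then 0 else d.getD (j - 1) 0) + 1) else t)
    (fun j => (if j = 0 then 0 else d.getD (j - 1) 0) + 1)
    (fun st2 j => rfl)]
  constructor
  · rw [pv_js_eq a b alo ahi blo bhi m h1 h2 h3 h4 h200 hm]
    rw [List.foldl_map]
    refine pv_offs_fold ((a.drop alo).take (ahi - alo)) ((b.drop blo).take (bhi - blo)) alo blo m
      (fun j => (if j = 0 then 0 else d.getD (j - 1) 0) + 1) _ ?_ sB
    intro j' hj'
    have hmem := List.mem_filter.mp hj'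
    have hjlt : j' < bhi - blo := by
      have := List.mem_range.mp hmem.1
      rwa [pv_slice_len b blo (bhi - blo) (by omega)] at this
    exact pv_kA_eq a b alo ahi blo bhi m hm d hd j' hjlt hmem.2
  · intro q
    rw [pv_getD_foldl_insert _ (fun j => (if j = 0 then 0 else d.getD (j - 1) 0) + 1)
      (fun dd j => rfl)]
    rw [PySem.Dict.getD_empty]
    have hmem_iff : q ∈ ((pvB2j b).getD (a.getD (alo + m) ' ') []).filter (fun j => blo ≤ j && j < bhi)
        ↔ (blo ≤ q ∧ q < bhi) ∧
          (((a.drop alo).take (ahi - alo)).getD m ' '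
            == ((b.drop blo).take (bhi - blo)).getD (q - blo) ' ') = true := by
      rw [pv_js_eq a b alo ahi blo bhi m h1 h2 h3 h4 h200 hm]
      rw [List.mem_map]
      constructor
      · rintro ⟨j', hj', rfl⟩
        have hmem := List.mem_filter.mp hj'
        have hjlt : j' < bhi - blo := by
          have := List.mem_range.mp hmem.1
          rwa [pv_slice_len b blo (bhi - blo) (by omega)] at this
        refine ⟨⟨by omega, by omega⟩, ?_⟩
        have e : blo + j' - blo = j' := by omega
        rw [e]
        exact hmem.2
      · rintro ⟨⟨hq1, hq2⟩, hq3⟩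
        refine ⟨q - blo, ?_, by omega⟩
        refine List.mem_filter.mpr ⟨?_, hq3⟩
        rw [pv_slice_len b blo (bhi - blo) (by omega)]
        exact List.mem_range.mpr (by omega)
    by_cases hw : blo ≤ q ∧ q < bhi
    · rw [if_pos hw]
      by_cases hmt : (((a.drop alo).take (ahi - alo)).getD m ' '
          == ((b.drop blo).take (bhi - blo)).getD (q - blo) ' ') = true
      · rw [if_pos (hmem_iff.mpr ⟨hw, hmt⟩)]
        have e : q = blo + (q - blo) := by omega
        rw [e]
        have e2 : blo + (q - blo) - blo = q - blo := by omega
        rw [e2]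
        exact pv_kA_eq a b alo ahi blo bhi m hm d hd (q - blo) (by omega) hmt
      · rw [if_neg (fun hc => hmt (hmem_iff.mp hc).2)]
        rw [pvRun_eq_zero _ _ m (q - blo) (by simpa using hmt)]
    · rw [if_neg (fun hc => hw (hmem_iff.mp hc).1), if_neg hw]

theorem pvBestRows_succ (a b : List Char) (m : Nat) :
    pvBestRows a b (m+1) = (pvRowJs a b m).foldl (pvUpd a b m) (pvBestRows a b m) := by
  unfold pvBestRows
  rw [List.range_succ, List.foldl_append]
  simp

theorem pvFlmScan_aux (a b : List Char) (alo ahi blo bhi : Nat)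
    (h1 : alo ≤ ahi) (h2 : ahi ≤ a.length) (h3 : blo ≤ bhi) (h4 : bhi ≤ b.length)
    (h200 : b.length < 200) : ∀ m, m ≤ ahi - alo →
    (((List.range' alo m).foldl
        (fun (st : (Nat × Nat × Nat) × PySem.Dict Nat Nat) (i : Nat) =>
          let js := ((pvB2j b).getD (a.getD i ' ') []).filter (fun j => blo ≤ j && j < bhi)
          js.foldl
            (fun (st2 : (Nat × Nat × Nat) × PySem.Dict Nat Nat) j =>
              let k := (if j = 0 then 0 else st.2.getD (j - 1) 0) + 1
              let best := if st2.1.2.2 < k then (i + 1 - k, j + 1 - k, k) else st2.1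
              (best, st2.2.insert j k))
            (st.1, PySem.Dict.empty))
        ((alo, blo, 0), PySem.Dict.empty)).1
      = pvOffs alo blo (pvBestRows ((a.drop alo).take (ahi - alo)) ((b.drop blo).take (bhi - blo)) m))
    ∧ ∀ q, ((List.range' alo m).foldl
        (fun (st : (Nat × Nat × Nat) × PySem.Dict Nat Nat) (i : Nat) =>
          let js := ((pvB2j b).getD (a.getD i ' ') []).filter (fun j => blo ≤ j && j < bhi)
          js.foldl
            (fun (st2 : (Nat × Nat × Nat) × PySem.Dict Nat Nat) j =>
              let k := (if j = 0 then 0 else st.2.getD (j - 1) 0) + 1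
              let best := if st2.1.2.2 < k then (i + 1 - k, j + 1 - k, k) else st2.1
              (best, st2.2.insert j k))
            (st.1, PySem.Dict.empty))
        ((alo, blo, 0), PySem.Dict.empty)).2.getD q 0
      = if blo ≤ q ∧ q < bhi ∧ 1 ≤ m then
          pvRun ((a.drop alo).take (ahi - alo)) ((b.drop blo).take (bhi - blo)) (m-1) (q - blo)
        else 0 := by
  intro m
  induction m with
  | zero =>
    intro _
    constructor
    · show ((alo, blo, 0) : Nat × Nat × Nat) = pvOffs alo blo (0, 0, 0)
      unfold pvOffs
      simp
    · intro q
      show (PySem.Dict.empty : PySem.Dict Nat Nat).getD q 0 = _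
      rw [PySem.Dict.getD_empty, if_neg (by omega)]
  | succ m ih =>
    intro hm1
    obtain ⟨ih1, ih2⟩ := ih (by omega)
    rw [List.range'_1_concat, List.foldl_append, List.foldl_cons, List.foldl_nil]
    generalize hP : (List.range' alo m).foldl _ ((alo, blo, 0), PySem.Dict.empty) = PP at ih1 ih2
    obtain ⟨pb, pd⟩ := PP
    replace ih1 : pb = pvOffs alo blo
      (pvBestRows ((a.drop alo).take (ahi - alo)) ((b.drop blo).take (bhi - blo)) m) := ih1
    subst ih1
    have hrow := pv_flm_row a b alo ahi blo bhi m h1 h2 h3 h4 h200 (by omega) pd ih2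
      (pvBestRows ((a.drop alo).take (ahi - alo)) ((b.drop blo).take (bhi - blo)) m)
    obtain ⟨hr1, hr2⟩ := hrow
    constructor
    · rw [pvBestRows_succ]
      exact hr1
    · intro q
      have h := hr2 q
      have hcond : (if blo ≤ q ∧ q < bhi ∧ 1 ≤ m + 1 then
          pvRun ((a.drop alo).take (ahi - alo)) ((b.drop blo).take (bhi - blo)) (m+1-1) (q - blo)
        else 0)
        = (if blo ≤ q ∧ q < bhi then
          pvRun ((a.drop alo).take (ahi - alo)) ((b.drop blo).take (bhi - blo)) m (q - blo)
        else 0) := by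
        by_cases hq : blo ≤ q ∧ q < bhi
        · rw [if_pos ⟨hq.1, hq.2, by omega⟩, if_pos hq]
          simp
        · rw [if_neg (by tauto), if_neg hq]
      rw [hcond]
      exact h

theorem pvFlmScan_eq (a b : List Char) (alo ahi blo bhi : Nat)
    (h1 : alo ≤ ahi) (h2 : ahi ≤ a.length) (h3 : blo ≤ bhi) (h4 : bhi ≤ b.length)
    (h200 : b.length < 200) :
    pvFlmScan a (pvB2j b) alo ahi blo bhi
      = pvOffs alo blo (pvBestAll ((a.drop alo).take (ahi - alo)) ((b.drop blo).take (bhi - blo))) := by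
  have := (pvFlmScan_aux a b alo ahi blo bhi h1 h2 h3 h4 h200 (ahi - alo) le_rfl).1
  unfold pvFlmScan
  unfold pvBestAll
  rw [pv_slice_len a alo (ahi - alo) (by omega)]
  exact this



-- ---------- the extension loops never fire ----------
theorem pvExtL_noop (a b : List Char) (alo blo fuel bi bj k : Nat)
    (h : (decide (alo < bi) && decide (blo < bj)
        && (a.getD (bi - 1) ' ' == b.getD (bj - 1) ' ')) = false) :
    pvExtL a b alo blo fuel bi bj k = (bi, bj, k) := by
  cases fuel with
  | zero => rfl
  | succ fuel =>
    simp only [pvExtL]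
    rw [if_neg (by rw [h]; exact Bool.false_ne_true)]

theorem pvExtR_noop (a b : List Char) (ahi bhi fuel bi bj k : Nat)
    (h : (decide (bi + k < ahi) && decide (bj + k < bhi)
        && (a.getD (bi + k) ' ' == b.getD (bj + k) ' ')) = false) :
    pvExtR a b ahi bhi fuel bi bj k = k := by
  cases fuel with
  | zero => rfl
  | succ fuel =>
    simp only [pvExtR]
    rw [if_neg (by rw [h]; exact Bool.false_ne_true)]

theorem pv_and3_false (P1 P2 : Prop) [Decidable P1] [Decidable P2] (C : Bool)
    (h : ¬P1 ∨ ¬P2 ∨ C = false) : (decide P1 && decide P2 && C) = false := by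
  rcases h with h | h | h
  · simp [h]
  · simp [h]
  · simp [h]

theorem pvFlm_eq (a b : List Char) (alo ahi blo bhi : Nat)
    (h1 : alo ≤ ahi) (h2 : ahi ≤ a.length) (h3 : blo ≤ bhi) (h4 : bhi ≤ b.length)
    (h200 : b.length < 200) :
    pvFlm a b (pvB2j b) alo ahi blo bhi
      = pvOffs alo blo (pvBestAll ((a.drop alo).take (ahi - alo)) ((b.drop blo).take (bhi - blo))) := by
  have hok := pvBestAll_ok ((a.drop alo).take (ahi - alo)) ((b.drop blo).take (bhi - blo))
  have hmax := pvBestAll_max ((a.drop alo).take (ahi - alo)) ((b.drop blo).take (bhi - blo))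
  have hla : ((a.drop alo).take (ahi - alo)).length = ahi - alo :=
    pv_slice_len a alo (ahi - alo) (by omega)
  have hlb : ((b.drop blo).take (bhi - blo)).length = bhi - blo :=
    pv_slice_len b blo (bhi - blo) (by omega)
  unfold pvFlm
  rw [pvFlmScan_eq a b alo ahi blo bhi h1 h2 h3 h4 h200]
  rcases hBA : pvBestAll ((a.drop alo).take (ahi - alo)) ((b.drop blo).take (bhi - blo))
    with ⟨bi, bj, k⟩
  rw [hBA] at hok hmax
  rw [hla, hlb] at hmax
  have hmax' : ∀ i < ahi - alo, ∀ j < bhi - blo,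
      pvRun ((a.drop alo).take (ahi - alo)) ((b.drop blo).take (bhi - blo)) i j ≤ k := hmax
  unfold pvOffs
  simp only
  by_cases hk : k = 0
  · subst hk
    have hz := hok.1 rfl
    have hbi : bi = 0 := by
      have := congrArg Prod.fst hz; simpa using this
    have hbj : bj = 0 := by
      have := congrArg (fun t => t.2.1) hz; simpa using this
    subst hbi; subst hbj
    have hL := pvExtL_noop a b alo blo (alo + 0) (alo + 0) (blo + 0) 0
      (by simp)
    rw [hL]
    have hR : pvExtR a b ahi bhi ahi (alo + 0) (blo + 0) 0 = 0 := by
      apply pvExtR_noop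
      apply pv_and3_false
      by_cases hA : alo + 0 + 0 < ahi
      · by_cases hB : blo + 0 + 0 < bhi
        · right; right
          cases hc : (a.getD (alo + 0 + 0) ' ' == b.getD (blo + 0 + 0) ' ')
          · rfl
          · exfalso
            have hc' : (a.getD (alo + 0) ' ' == b.getD (blo + 0) ' ') = true := hc
            rw [pv_match_transfer a b alo ahi blo bhi 0 0 (by omega) (by omega)] at hc'
            have hge := pvRun_one_le _ _ 0 0 hc'
            have hle := hmax' 0 (by omega) 0 (by omega)
            omega
        · right; left; exact hB
      · left; exact hA
    rw [hR]
  · have hpos := hok.2 (Nat.pos_of_ne_zero (by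
      intro hc
      exact hk (by simpa using hc)))
    have hb1 : bi + k ≤ ahi - alo := by
      have := hpos.1; rw [hla] at this; exact this
    have hb2 : bj + k ≤ bhi - blo := by
      have := hpos.2.1; rw [hlb] at this; exact this
    have hrun : pvRun ((a.drop alo).take (ahi - alo)) ((b.drop blo).take (bhi - blo))
        (bi + k - 1) (bj + k - 1) = k := hpos.2.2
    have hk1 : 1 ≤ k := Nat.pos_of_ne_zero hk
    have hL := pvExtL_noop a b alo blo (alo + bi) (alo + bi) (blo + bj) k
      (by
        apply pv_and3_false
        by_cases hA : alo < alo + bi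
        · by_cases hB : blo < blo + bj
          · right; right
            have hstop := pvRun_stop ((a.drop alo).take (ahi - alo))
              ((b.drop blo).take (bhi - blo)) (bi + k - 1) (bj + k - 1)
            rw [hrun] at hstop
            have hchars := hstop (by omega) (by omega)
            have e1 : bi + k - 1 - k = bi - 1 := by omega
            have e2 : bj + k - 1 - k = bj - 1 := by omega
            rw [e1, e2] at hchars
            have e3 : alo + bi - 1 = alo + (bi - 1) := by omega
            have e4 : blo + bj - 1 = blo + (bj - 1) := by omega
            rw [e3, e4, pv_match_transfer a b alo ahi blo bhi (bi - 1) (bj - 1)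
              (by omega) (by omega)]
            exact hchars
          · right; left; exact hB
        · left; exact hA)
    rw [hL]
    have hR : pvExtR a b ahi bhi ahi (alo + bi) (blo + bj) k = k := by
      apply pvExtR_noop
      apply pv_and3_false
      by_cases hA : alo + bi + k < ahi
      · by_cases hB : blo + bj + k < bhi
        · right; right
          cases hc : (a.getD (alo + bi + k) ' ' == b.getD (blo + bj + k) ' ')
          · rfl
          · exfalso
            have e1 : alo + bi + k = alo + (bi + k) := by omega
            have e2 : blo + bj + k = blo + (bj + k) := by omega
            rw [e1, e2, pv_match_transfer a b alo ahi blo bhi (bi + k) (bj + k)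
              (by omega) (by omega)] at hc
            have e3 : bi + k = (bi + k - 1) + 1 := by omega
            have e4 : bj + k = (bj + k - 1) + 1 := by omega
            rw [e3, e4] at hc
            have hsucc := pvRun_succ _ _ (bi + k - 1) (bj + k - 1) hc
            rw [hrun] at hsucc
            have := hmax' (bi + k - 1 + 1) (by omega) (bj + k - 1 + 1) (by omega)
            omega
        · right; left; exact hB
      · left; exact hA
    rw [hR]

-- ---------- gestalt fuel irrelevance ----------
theorem pvLcb_bounds (a b : List Char) (bi bj k : Nat) (h : pvLcb a b = (bi, bj, k))
    (hk : k ≠ 0) : bi + k ≤ a.length ∧ bj + k ≤ b.length := by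
  rw [pvLcb_eq_bestAll] at h
  have hok := pvBestAll_ok a b
  rw [h] at hok
  have := hok.2 (Nat.pos_of_ne_zero (by intro hc; exact hk (by simpa using hc)))
  exact ⟨this.1, this.2.1⟩

theorem pvGestalt_fuel_aux : ∀ (n : Nat) (a b : List Char), a.length ≤ n →
    ∀ f1 f2, a.length < f1 → a.length < f2 → pvGestalt a b f1 = pvGestalt a b f2 := by
  intro n
  induction n with
  | zero =>
    intro a b hn f1 f2 hf1 hf2
    cases f1 with
    | zero => omega
    | succ g1 =>
      cases f2 with
      | zero => omega
      | succ g2 =>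
        simp only [pvGestalt]
        rcases hL : pvLcb a b with ⟨bi, bj, k⟩
        by_cases hk : k = 0
        · subst hk; rfl
        · exfalso
          have := (pvLcb_bounds a b bi bj k hL hk).1
          omega
  | succ n ih =>
    intro a b hn f1 f2 hf1 hf2
    cases f1 with
    | zero => omega
    | succ g1 =>
      cases f2 with
      | zero => omega
      | succ g2 =>
        simp only [pvGestalt]
        rcases hL : pvLcb a b with ⟨bi, bj, k⟩
        by_cases hk : k = 0
        · subst hk; rfl
        · have hb := pvLcb_bounds a b bi bj k hL hk
          have hk1 : 1 ≤ k := Nat.pos_of_ne_zero hk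
          simp only [if_neg hk]
          have hlt : (a.take bi).length = bi := by
            rw [List.length_take]; omega
          have hld : (a.drop (bi + k)).length = a.length - (bi + k) := by
            rw [List.length_drop]
          have eL := ih (a.take bi) (b.take bj) (by omega) g1 g2 (by omega) (by omega)
          have eR := ih (a.drop (bi + k)) (b.drop (bj + k)) (by omega) g1 g2
            (by omega) (by omega)
          rw [eL, eR]

theorem pvGestalt_fuel (a b : List Char) :
    ∀ f1 f2, a.length < f1 → a.length < f2 → pvGestalt a b f1 = pvGestalt a b f2 := by
  intro f1 f2 h1 h2
  exact pvGestalt_fuel_aux a.length a b le_rfl f1 f2 h1 h2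

-- ---------- the stack machine computes the gestalt sum ----------
theorem pvMatches_eq (a b : List Char) (h200 : b.length < 200) :
    ∀ (fuel : Nat) (stack : List (Nat × Nat × Nat × Nat)) (acc : Nat),
      (∀ w ∈ stack, w.1 ≤ w.2.1 ∧ w.2.1 ≤ a.length ∧ w.2.2.1 ≤ w.2.2.2 ∧ w.2.2.2 ≤ b.length) →
      (stack.map (fun w => 2 * (w.2.1 - w.1) + 1)).sum < fuel →
      pvMatches a b (pvB2j b) fuel stack acc
        = acc + (stack.map (fun w =>
            pvGestalt ((a.drop w.1).take (w.2.1 - w.1)) ((b.drop w.2.2.1).take (w.2.2.2 - w.2.2.1))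
              ((w.2.1 - w.1) + 1))).sum := by
  intro fuel
  induction fuel with
  | zero => intro stack acc _ hb; omega
  | succ fuel ih =>
    intro stack acc hw hb
    cases stack with
    | nil => simp [pvMatches]
    | cons w stack =>
      rcases w with ⟨alo, ahi, blo, bhi⟩
      obtain ⟨hw1, hw2, hw3, hw4⟩ := hw _ (List.mem_cons_self)
      simp only at hw1 hw2 hw3 hw4
      have hwt : ∀ w ∈ stack, w.1 ≤ w.2.1 ∧ w.2.1 ≤ a.length ∧ w.2.2.1 ≤ w.2.2.2 ∧ w.2.2.2 ≤ b.length :=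
        fun w hwm => hw w (List.mem_cons_of_mem _ hwm)
      simp only [pvMatches]
      rw [pvFlm_eq a b alo ahi blo bhi hw1 hw2 hw3 hw4 h200]
      rcases hBA : pvBestAll ((a.drop alo).take (ahi - alo)) ((b.drop blo).take (bhi - blo))
        with ⟨bi, bj, k⟩
      have hok := pvBestAll_ok ((a.drop alo).take (ahi - alo)) ((b.drop blo).take (bhi - blo))
      rw [hBA] at hok
      have hGfull : pvGestalt ((a.drop alo).take (ahi - alo)) ((b.drop blo).take (bhi - blo))
          ((ahi - alo) + 1)
          = if k = 0 then 0
            else k + pvGestalt (((a.drop alo).take (ahi - alo)).take bi)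
                (((b.drop blo).take (bhi - blo)).take bj) (ahi - alo)
              + pvGestalt (((a.drop alo).take (ahi - alo)).drop (bi + k))
                (((b.drop blo).take (bhi - blo)).drop (bj + k)) (ahi - alo) := by
        simp only [pvGestalt]
        rw [pvLcb_eq_bestAll, hBA]
      unfold pvOffs
      simp only
      by_cases hk : k = 0
      · subst hk
        have hz := hok.1 rfl
        have hbi : bi = 0 := by have := congrArg Prod.fst hz; simpa using this
        have hbj : bj = 0 := by have := congrArg (fun t => t.2.1) hz; simpa using this
        subst hbi; subst hbj
        rw [if_pos rfl]
        rw [ih stack acc hwt (by simp only [List.map_cons, List.sum_cons] at hb; omega)]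
        simp only [List.map_cons, List.sum_cons]
        rw [hGfull]
        simp
      · rw [if_neg hk]
        have hb1 : bi + k ≤ ahi - alo := by
          have := (hok.2 (Nat.pos_of_ne_zero hk)).1
          rwa [pv_slice_len a alo (ahi - alo) (by omega)] at this
        have hb2 : bj + k ≤ bhi - blo := by
          have := (hok.2 (Nat.pos_of_ne_zero hk)).2.1
          rwa [pv_slice_len b blo (bhi - blo) (by omega)] at this
        have hk1 : 1 ≤ k := Nat.pos_of_ne_zero hk
        have hrec := ih ((alo, alo + bi, blo, blo + bj) :: (alo + bi + k, ahi, blo + bj + k, bhi) :: stack)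
          (acc + k)
          (by
            intro w hwm
            rcases List.mem_cons.mp hwm with h | h
            · subst h
              refine ⟨?_, ?_, ?_, ?_⟩
              · show alo ≤ alo + bi; omega
              · show alo + bi ≤ a.length; omega
              · show blo ≤ blo + bj; omega
              · show blo + bj ≤ b.length; omega
            rcases List.mem_cons.mp h with h | h
            · subst h
              refine ⟨?_, ?_, ?_, ?_⟩
              · show alo + bi + k ≤ ahi; omega
              · show ahi ≤ a.length; omega
              · show blo + bj + k ≤ bhi; omega
              · show bhi ≤ b.length; omega
            · exact hwt w h)
          (by simp only [List.map_cons, List.sum_cons] at hb ⊢; omega)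
        rw [hrec]
        -- rewrite the two pushed windows' slices as slices of the big slices
        have eLa : (a.drop alo).take (alo + bi - alo) = ((a.drop alo).take (ahi - alo)).take bi := by
          rw [List.take_take]
          congr 1
          omega
        have eLb : (b.drop blo).take (blo + bj - blo) = ((b.drop blo).take (bhi - blo)).take bj := by
          rw [List.take_take]
          congr 1
          omega
        have eRa : (a.drop (alo + bi + k)).take (ahi - (alo + bi + k))
            = ((a.drop alo).take (ahi - alo)).drop (bi + k) := by
          rw [List.drop_take, List.drop_drop]
          congr 1
          · omega
          · congr 1; omega
        have eRb : (b.drop (blo + bj + k)).take (bhi - (blo + bj + k))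
            = ((b.drop blo).take (bhi - blo)).drop (bj + k) := by
          rw [List.drop_take, List.drop_drop]
          congr 1
          · omega
          · congr 1; omega
        simp only [List.map_cons, List.sum_cons]
        rw [eLa, eLb, eRa, eRb]
        -- align the fuels
        have hlenL : (((a.drop alo).take (ahi - alo)).take bi).length = bi := by
          rw [List.length_take, pv_slice_len a alo (ahi - alo) (by omega)]
          omega
        have hlenR : (((a.drop alo).take (ahi - alo)).drop (bi + k)).length
            = (ahi - alo) - (bi + k) := by
          rw [List.length_drop, pv_slice_len a alo (ahi - alo) (by omega)]
        have eFL : pvGestalt (((a.drop alo).take (ahi - alo)).take bi)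
              (((b.drop blo).take (bhi - blo)).take bj) (alo + bi - alo + 1)
            = pvGestalt (((a.drop alo).take (ahi - alo)).take bi)
              (((b.drop blo).take (bhi - blo)).take bj) (ahi - alo) := by
          apply pvGestalt_fuel
          · rw [hlenL]; omega
          · rw [hlenL]; omega
        have eFR : pvGestalt (((a.drop alo).take (ahi - alo)).drop (bi + k))
              (((b.drop blo).take (bhi - blo)).drop (bj + k)) (ahi - (alo + bi + k) + 1)
            = pvGestalt (((a.drop alo).take (ahi - alo)).drop (bi + k))
              (((b.drop blo).take (bhi - blo)).drop (bj + k)) (ahi - alo) := by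
          apply pvGestalt_fuel
          · rw [hlenR]; omega
          · rw [hlenR]; omega
        rw [eFL, eFR, hGfull, if_neg hk]
        omega

-- ---------- the two ratio tests agree (features shorter than 200) ----------
theorem pvRatio_eq (w f : String) (h : f.toList.length < 200) :
    pvRatioGE08 w f
      = decide (2 * (w.toList.length + f.toList.length)
          ≤ 5 * pvGestalt w.toList f.toList (w.toList.length + 1)) := by
  unfold pvRatioGE08
  have hM := pvMatches_eq w.toList f.toList h (2 * w.toList.length + 2)
    [(0, w.toList.length, 0, f.toList.length)] 0
    (by
      intro ww hww
      simp only [List.mem_singleton] at hww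
      subst hww
      exact ⟨Nat.zero_le _, le_rfl, Nat.zero_le _, le_rfl⟩)
    (by simp only [List.map_cons, List.map_nil, List.sum_cons, List.sum_nil]; omega)
  show decide (2 * (w.toList.length + f.toList.length)
      ≤ 5 * pvMatches w.toList f.toList (pvB2j f.toList) (2 * w.toList.length + 2)
          [(0, w.toList.length, 0, f.toList.length)] 0) = _
  rw [hM]
  simp only [List.map_cons, List.map_nil, List.sum_cons, List.sum_nil, List.drop_zero,
    Nat.sub_zero, List.take_length, Nat.zero_add, Nat.add_zero]

-- ---------- A's two staged scans form B's single fused scan ----------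
theorem pv_scans_fuse (w : String) (fs : List String) (hf : ∀ f ∈ fs, f.toList.length < 200) :
    (pvContainLoop w fs || pvFuzzyLoop w fs)
      = pvAltLoop w (PySem.Str.replace w " " "") fs := by
  induction fs with
  | nil => rfl
  | cons f rest ih =>
    have ifor : ∀ (b x : Bool), (if b = true then true else x) = (b || x) := by
      intro b x; cases b <;> simp
    simp only [pvContainLoop, pvFuzzyLoop, pvAltLoop, ifor, ← ih (fun f hm => hf f (by simp [hm]))]
    rw [pvRatio_eq w f (hf f (by simp))]
    cases h3 : PySem.Str.isIn (PySem.Str.replace w " " "") (PySem.Str.replace f " " "") <;>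
      cases h4 : PySem.Str.isIn (PySem.Str.replace f " " "") (PySem.Str.replace w " " "")
    · cases h1 : PySem.Str.isIn w f
      · cases h2 : PySem.Str.isIn f w
        · cases hr : decide (2 * (w.toList.length + f.toList.length)
              ≤ 5 * pvGestalt w.toList f.toList (w.toList.length + 1)) <;>
            cases hC : pvContainLoop w rest <;> cases hF : pvFuzzyLoop w rest <;>
            rfl
        · exact absurd (pv_isIn_nospace f w h2) (by rw [h4]; exact Bool.false_ne_true)
      · exact absurd (pv_isIn_nospace w f h1) (by rw [h3]; exact Bool.false_ne_true)
    · simp only [Bool.or_true, Bool.true_or]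
    · simp only [Bool.or_true, Bool.true_or, Bool.or_false]
    · simp only [Bool.or_true, Bool.true_or]

-- ===== VERDICT =====
theorem match_against_features_py_spec : Claim_equal_match_against_features_py := by
  intro w fs _ hpre
  unfold Spec_match_against_features_py match_against_features_py match_against_features_py_alt
  by_cases hg : (w.toList.isEmpty || fs.isEmpty) = true
  · rw [if_pos hg, if_pos hg]
  · rw [if_neg hg, if_neg hg]
    have ifor : ∀ (b x : Bool), (if b = true then true else x) = (b || x) := by
      intro b x; cases b <;> simp
    rw [ifor]
    exact pv_scans_fuse w fs hpre
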